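-- pv_equiv track=rewrite | github.com/TomD0wning/DataStructuresAndAlgorithms | Activities/M269_Unit_5/Python_activity_5.2/Python_activity_5.2.py | getLegalStates
-- ===== SOURCE A (Python) =====
-- def getLegalStates(state):
--     legalStates = []
--     for j in range(len(state)):
--         if state[j] > 2:
--             for splitValue in range(1, (state[j] // 2) + 1):
--                 if splitValue != state[j] - splitValue:
--                     newState = state[:j] + [state[j] - splitValue, splitValue] + state[j + 1:]
--                     newState.sort(reverse = True)
--                     if newState not in legalStates:
--                         legalStates.insert(0, newState)
--     return legalStates
-- ===== SOURCE B (Python) =====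
-- def getLegalStates(state):
--     # No output deduplication at all: splitting distinct pile values (or distinct
--     # split sizes) always yields distinct sorted states, so it suffices to skip
--     # repeated pile values.  Candidates are collected in order and reversed once.
--     out = []
--     seen = set()
--     for j, v in enumerate(state):
--         if v > 2 and v not in seen:
--             seen.add(v)
--             rest = state[:j] + state[j + 1:]
--             for s in range(1, v // 2 + 1):
--                 if 2 * s != v:
--                     out.append(sorted(rest + [v - s, s], reverse=True))
--     return out[::-1]
-- ===== Notes on version B (the rewrite author's own statement) =====
-- stated objective: faster
-- what changed: B drops A's output deduplication entirely: it proves-by-construction that candidates from distinct pile values or distinct split sizes are always distinct sorted states, so it only skips repeated pile values with a seen-value set, appends candidates in order and reverses once, instead of A's per-candidate linear membership scan over the growing result list with insert(0).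
import Mathlib
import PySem

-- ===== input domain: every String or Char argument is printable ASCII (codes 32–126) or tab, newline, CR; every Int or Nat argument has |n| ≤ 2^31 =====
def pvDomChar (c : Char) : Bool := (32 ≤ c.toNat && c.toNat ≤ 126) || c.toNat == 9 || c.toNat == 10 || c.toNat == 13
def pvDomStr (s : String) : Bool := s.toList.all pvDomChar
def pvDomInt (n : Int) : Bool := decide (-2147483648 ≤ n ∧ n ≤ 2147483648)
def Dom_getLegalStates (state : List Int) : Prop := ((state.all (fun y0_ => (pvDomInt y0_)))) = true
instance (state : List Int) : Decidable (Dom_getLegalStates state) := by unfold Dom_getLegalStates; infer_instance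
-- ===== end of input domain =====

-- B performs no output deduplication at all (distinct pile values / split sizes provably
-- yield distinct sorted states): it only skips repeated pile values, appends candidates in
-- order and reverses once, replacing A's per-candidate membership scan with insert(0).

-- ===== PORT A =====
def getLegalStates (state : List Int) : List (List Int) :=
  (PySem.List.pyRange 0 (state.length : Int) 1).foldl (fun legalStates j =>
    if PySem.List.pyGetD state j 0 > 2 then
      (PySem.List.pyRange 1 (PySem.Int.floordiv (PySem.List.pyGetD state j 0) 2 + 1) 1).foldl
        (fun acc splitValue =>
          if splitValue ≠ PySem.List.pyGetD state j 0 - splitValue then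
            let newState := PySem.List.sorted
              (PySem.List.slice state none (some j) ++
               [PySem.List.pyGetD state j 0 - splitValue, splitValue] ++
               PySem.List.slice state (some (j + 1)) none) (fun x => x) true
            if newState ∈ acc then acc else newState :: acc
          else acc) legalStates
    else legalStates) []

-- ===== PORT B =====
-- 'for j, v in enumerate(state)' is a fold over PySem.List.enumerate with the (seen, out)
-- pair as accumulator; 'out[::-1]' is List.reverse (exact for step -1 over the whole list).
def getLegalStates_alt (state : List Int) : List (List Int) :=
  let r := (PySem.List.enumerate state).foldl
    (fun (p : PySem.Set Int × List (List Int)) jv =>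
      if jv.2 > 2 ∧ ¬ PySem.Set.contains p.1 jv.2 then
        (PySem.Set.add p.1 jv.2,
         (PySem.List.pyRange 1 (PySem.Int.floordiv jv.2 2 + 1) 1).foldl
           (fun out s =>
             if 2 * s ≠ jv.2 then
               out ++ [PySem.List.sorted
                 ((PySem.List.slice state none (some jv.1) ++
                   PySem.List.slice state (some (jv.1 + 1)) none) ++ [jv.2 - s, s])
                 (fun x => x) true]
             else out) p.2)
      else p)
    (PySem.Set.empty, [])
  r.2.reverse

-- ===== PRECONDITION & SPEC =====
def Spec_getLegalStates (state : List Int) (out : List (List Int)) : Prop := out = getLegalStates_alt state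
instance (state : List Int) (out : List (List Int)) : Decidable (Spec_getLegalStates state out) := by unfold Spec_getLegalStates; infer_instance

-- ===== CLAIM (what is proved, stated in full; the proofs are below) =====
def Claim_equal_getLegalStates : Prop := ∀ (state : List Int), Dom_getLegalStates state → Spec_getLegalStates state (getLegalStates state)

-- ===== LEMMAS AND PROOFS =====

-- the split sizes Python enumerates for a pile of value v (normalised test 2*s ≠ v)
def pvSplits (v : Int) : List Int :=
  (PySem.List.pyRange 1 (PySem.Int.floordiv v 2 + 1) 1).filter (fun s => decide (2 * s ≠ v))

-- the candidate state obtained by splitting pile j into (v - s, s), in A's shape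
def pvCand (state : List Int) (j : Nat) (s : Int) : List Int :=
  PySem.List.sorted
    (state.take j ++ [state.getD j 0 - s, s] ++ state.drop (j + 1)) (fun x => x) true

def pvBlock (state : List Int) (j : Nat) : List (List Int) :=
  if 2 < state.getD j 0 then (pvSplits (state.getD j 0)).map (pvCand state j) else []

def pvStepB (state : List Int) (p : List Int × List (List Int)) (j : Nat) :
    List Int × List (List Int) :=
  if 2 < state.getD j 0 ∧ state.getD j 0 ∉ p.1 then
    (p.1 ++ [state.getD j 0], p.2 ++ pvBlock state j) else p

-- A's accumulator step: prepend if new.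
def pvStep (acc : List (List Int)) (c : List Int) : List (List Int) :=
  if c ∈ acc then acc else c :: acc

-- folding pvStep from a reversed seed is the reverse of folding Set.add
theorem pvStep_rev (cs : List (List Int)) (s : List (List Int)) :
    cs.foldl pvStep s.reverse = (cs.foldl PySem.Set.add s).reverse := by
  induction cs generalizing s with
  | nil => rfl
  | cons c cs ih =>
    simp only [List.foldl_cons]
    have hc : pvStep s.reverse c = (PySem.Set.add s c).reverse := by
      by_cases h : c ∈ s <;>
        simp [pvStep, PySem.Set.add, PySem.Set.contains, h]
    rw [hc, ih]

-- a fold of per-index folds is a fold over the flattened candidate list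

-- a fold of per-index folds is a fold over the flattened candidate list
theorem foldl_foldl_flatMap {α β : Type} (f : List β → β → List β)
    (C : α → List β) (l : List α) (init : List β) :
    l.foldl (fun acc j => (C j).foldl f acc) init = (l.flatMap C).foldl f init := by
  induction l generalizing init with
  | nil => rfl
  | cons a l ih => simp [List.foldl_append, ih]

-- folding Set.add over elements already present is a no-op

-- folding Set.add over elements already present is a no-op
theorem pvFoldlAdd_mem (cs : List (List Int)) (acc : List (List Int))
    (h : ∀ c ∈ cs, c ∈ acc) : cs.foldl PySem.Set.add acc = acc := by
  induction cs generalizing acc with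
  | nil => rfl
  | cons c cs ih =>
    have hc : PySem.Set.add acc c = acc := by
      simp [PySem.Set.add, PySem.Set.contains, h c (by simp)]
    simp only [List.foldl_cons, hc]
    exact ih acc (fun d hd => h d (by simp [hd]))

-- folding Set.add over fresh, duplicate-free elements appends them all

-- folding Set.add over fresh, duplicate-free elements appends them all
theorem pvFoldlAdd_new (cs : List (List Int)) (acc : List (List Int))
    (hnd : cs.Nodup) (h : ∀ c ∈ cs, c ∉ acc) :
    cs.foldl PySem.Set.add acc = acc ++ cs := by
  induction cs generalizing acc with
  | nil => simp
  | cons c cs ih =>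
    have hc : PySem.Set.add acc c = acc ++ [c] := by
      simp [PySem.Set.add, PySem.Set.contains, h c (by simp)]
    simp only [List.foldl_cons, hc]
    rw [ih (acc ++ [c]) hnd.of_cons]
    · simp
    · intro d hd
      simp only [List.mem_append, List.mem_singleton]
      rintro (hda | rfl)
      · exact h d (by simp [hd]) hda
      · exact (List.nodup_cons.mp hnd).1 hd

theorem pvNodup_pyRange (a b : Int) : (PySem.List.pyRange a b 1).Nodup := by
  rw [PySem.List.pyRange_of_pos a b one_pos]
  refine List.Nodup.map ?_ List.nodup_range
  intro x y h
  simp only at h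
  omega

-- reverse-sorting with the identity key is invariant under permutation of the input
theorem pvSorted_rev_congr {l1 l2 : List Int} (h : l1.Perm l2) :
    PySem.List.sorted l1 (fun x => x) true = PySem.List.sorted l2 (fun x => x) true := by
  refine PySem.List.eq_of_perm_of_pairwise_le_of_injective (key := fun x : Int => -x)
    neg_injective ?_ ?_ ?_
  · exact (PySem.List.sorted_perm l1 _ true).trans (h.trans (PySem.List.sorted_perm l2 _ true).symm)
  · exact (PySem.List.sorted_pairwise_rev l1 (fun x => x)).imp (fun h => by dsimp only; omega)
  · exact (PySem.List.sorted_pairwise_rev l2 (fun x => x)).imp (fun h => by dsimp only; omega)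

-- removing position j (value put up front) is a permutation of the list
theorem pvSplit_perm (l : List Int) (j : Nat) (h : j < l.length) :
    l.Perm (l.getD j 0 :: (l.take j ++ l.drop (j + 1))) := by
  have hd : l.getD j 0 = l[j] := List.getD_eq_getElem l 0 h
  conv_lhs => rw [← List.take_append_drop j l, ← List.getElem_cons_drop h]
  rw [hd]
  exact List.perm_middle

-- inserting the pair [a, b] at position j, up to permutation
theorem pvMid_perm (l : List Int) (j : Nat) (a b : Int) :
    (l.take j ++ [a, b] ++ l.drop (j + 1)).Perm (a :: b :: (l.take j ++ l.drop (j + 1))) := by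
  have h1 : (l.take j ++ (a :: b :: l.drop (j+1))).Perm (a :: (l.take j ++ (b :: l.drop (j+1)))) :=
    List.perm_middle
  have h2 : (l.take j ++ (b :: l.drop (j+1))).Perm (b :: (l.take j ++ l.drop (j+1))) :=
    List.perm_middle
  simpa [List.append_assoc] using h1.trans ((h2.cons a))

-- equal pile values at two positions give the same candidate for every split size
theorem pvCand_congr (state : List Int) (j k : Nat) (hj : j < state.length)
    (hk : k < state.length) (heq : state.getD j 0 = state.getD k 0) (s : Int) :
    pvCand state j s = pvCand state k s := by
  apply pvSorted_rev_congr
  have hT : (state.take j ++ state.drop (j + 1)).Perm (state.take k ++ state.drop (k + 1)) := by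
    have h1 := pvSplit_perm state j hj
    have h2 := pvSplit_perm state k hk
    exact ((heq ▸ h1.symm.trans h2)).cons_inv
  have h1 := pvMid_perm state j (state.getD j 0 - s) s
  have h2 := pvMid_perm state k (state.getD k 0 - s) s
  have hmid : ((state.getD j 0 - s) :: s :: (state.take j ++ state.drop (j + 1))).Perm
      ((state.getD k 0 - s) :: s :: (state.take k ++ state.drop (k + 1))) := by
    rw [heq]; exact ((hT.cons s).cons _)
  exact (h1.trans hmid).trans h2.symm

-- the bounds Python's split range imposes on a split size
theorem pvSplits_mem {v s : Int} (hs : s ∈ pvSplits v) (_hv : 2 < v) :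
    1 ≤ s ∧ 2 * s ≤ v ∧ 2 * s ≠ v := by
  obtain ⟨h1, h2⟩ := List.mem_filter.mp hs
  have h3 := PySem.List.mem_pyRange_one.mp h1
  rw [PySem.Int.floordiv_eq_ediv_of_pos (by norm_num)] at h3
  simp only [decide_eq_true_eq] at h2
  omega

-- a candidate determines the pile value and the split size (so no duplicates arise)
theorem pvCand_inj (state : List Int) (j k : Nat) (hj : j < state.length)
    (hk : k < state.length) (hvj : 2 < state.getD j 0) (hvk : 2 < state.getD k 0)
    {s t : Int} (hs : s ∈ pvSplits (state.getD j 0)) (ht : t ∈ pvSplits (state.getD k 0))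
    (he : pvCand state j s = pvCand state k t) :
    state.getD j 0 = state.getD k 0 ∧ s = t := by
  set v := state.getD j 0
  set w := state.getD k 0 with hw
  obtain ⟨hs1, hs2, hs3⟩ := pvSplits_mem hs hvj
  obtain ⟨ht1, ht2, ht3⟩ := pvSplits_mem ht hvk
  -- permutation of the unsorted inputs
  have P1 : (state.take j ++ [v - s, s] ++ state.drop (j + 1)).Perm
      (state.take k ++ [w - t, t] ++ state.drop (k + 1)) := by
    have e1 := PySem.List.sorted_perm (state.take j ++ [v - s, s] ++ state.drop (j + 1)) (fun x : Int => x) true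
    have e2 := PySem.List.sorted_perm (state.take k ++ [w - t, t] ++ state.drop (k + 1)) (fun x : Int => x) true
    have he' : PySem.List.sorted (state.take j ++ [v - s, s] ++ state.drop (j + 1)) (fun x : Int => x) true
        = PySem.List.sorted (state.take k ++ [w - t, t] ++ state.drop (k + 1)) (fun x : Int => x) true := he
    exact (he' ▸ e1).symm.trans e2
  have Q : ([v - s, s] ++ (state.take j ++ state.drop (j + 1))).Perm
      ([w - t, t] ++ (state.take k ++ state.drop (k + 1))) := by
    have := ((pvMid_perm state j (v - s) s).symm.trans P1).trans (pvMid_perm state k (w - t) t)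
    simpa using this
  have R : (v :: (state.take j ++ state.drop (j + 1))).Perm
      (w :: (state.take k ++ state.drop (k + 1))) :=
    (pvSplit_perm state j hj).symm.trans (pvSplit_perm state k hk)
  -- counts
  have hvw : v = w := by
    have q := Q.count_eq v
    have r := R.count_eq v
    simp only [List.count_append, List.count_cons, List.count_nil] at q r
    by_cases h1 : w = v <;> by_cases h2 : w - t = v <;> by_cases h3 : t = v <;>
      simp [h1, h2, h3, show ¬ (v - s = v) by omega, show ¬ (s = v) by omega] at q r <;> omega
  refine ⟨hvw, ?_⟩
  rw [← hvw] at ht2 ht3 Q R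
  by_cases hst : s = t
  · exact hst
  · exfalso
    have qs := Q.count_eq s
    have qt := Q.count_eq t
    have rs := R.count_eq s
    have rt := R.count_eq t
    simp only [List.count_append, List.count_cons, List.count_nil] at qs qt rs rt
    by_cases h1 : v - t = s <;> by_cases h2 : v - s = t <;>
      simp [h1, h2, hst, Ne.symm hst] at qs qt rs rt <;> omega

-- the main invariant: A's dedup fold over all blocks equals B's value-skipping fold
theorem pvMain (state : List Int) (js : List Nat) (seen : List Int) (acc : List (List Int))
    (hjs : ∀ j ∈ js, j < state.length)
    (hseen : ∀ v ∈ seen, ∃ k, k < state.length ∧ state.getD k 0 = v)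
    (hacc : ∀ c, c ∈ acc ↔ ∃ k, k < state.length ∧ state.getD k 0 ∈ seen ∧
      2 < state.getD k 0 ∧ ∃ s ∈ pvSplits (state.getD k 0), c = pvCand state k s) :
    (js.flatMap (pvBlock state)).foldl PySem.Set.add acc
      = (js.foldl (pvStepB state) (seen, acc)).2 := by
  induction js generalizing seen acc with
  | nil => rfl
  | cons j js ih =>
    have hjn : j < state.length := hjs j (by simp)
    simp only [List.flatMap_cons, List.foldl_append, List.foldl_cons]
    by_cases h2 : 2 < state.getD j 0
    · by_cases hv : state.getD j 0 ∈ seen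
      · -- value seen before: block is all-old, B skips
        have hb : (pvBlock state j).foldl PySem.Set.add acc = acc := by
          apply pvFoldlAdd_mem
          intro c hc
          rw [pvBlock, if_pos h2, List.mem_map] at hc
          obtain ⟨s, hsmem, rfl⟩ := hc
          obtain ⟨k, hkn, hkv⟩ := hseen _ hv
          refine (hacc _).mpr ⟨k, hkn, ?_, ?_, s, ?_, ?_⟩
          · rw [hkv]; exact hv
          · rw [hkv]; exact h2
          · rw [hkv]; exact hsmem
          · exact pvCand_congr state j k hjn hkn hkv.symm s
        have hstep : pvStepB state (seen, acc) j = (seen, acc) := by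
          rw [pvStepB, if_neg (fun h => h.2 hv)]
        rw [hb, hstep]
        exact ih seen acc (fun x hx => hjs x (List.mem_cons_of_mem _ hx)) hseen hacc
      · -- fresh value: block is all-new and duplicate-free
        have hnd : (pvBlock state j).Nodup := by
          rw [pvBlock, if_pos h2]
          refine List.Nodup.map_on ?_ ((pvNodup_pyRange _ _).filter _)
          intro s hsm t htm he
          exact (pvCand_inj state j j hjn hjn h2 h2 hsm htm he).2
        have hfresh : ∀ c ∈ pvBlock state j, c ∉ acc := by
          intro c hc hcacc
          rw [pvBlock, if_pos h2, List.mem_map] at hc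
          obtain ⟨s, hsmem, rfl⟩ := hc
          obtain ⟨k, hkn, hkseen, hk2, t, htmem, heq⟩ := (hacc _).mp hcacc
          have := (pvCand_inj state j k hjn hkn h2 hk2 hsmem htmem heq).1
          exact hv (this ▸ hkseen)
        have hb := pvFoldlAdd_new _ acc hnd hfresh
        have hstep : pvStepB state (seen, acc) j
            = (seen ++ [state.getD j 0], acc ++ pvBlock state j) := by
          rw [pvStepB, if_pos ⟨h2, hv⟩]
        rw [hb, hstep]
        refine ih _ _ (fun x hx => hjs x (List.mem_cons_of_mem _ hx)) ?_ ?_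
        · intro v hvm
          rcases List.mem_append.mp hvm with h | h
          · exact hseen v h
          · exact ⟨j, hjn, by simpa using (List.mem_singleton.mp h).symm⟩
        · intro c
          constructor
          · intro hcm
            rcases List.mem_append.mp hcm with h | h
            · obtain ⟨k, hkn, hks, hk2, s, hsm, rfl⟩ := (hacc _).mp h
              exact ⟨k, hkn, List.mem_append.mpr (Or.inl hks), hk2, s, hsm, rfl⟩
            · rw [pvBlock, if_pos h2, List.mem_map] at h
              obtain ⟨s, hsm, rfl⟩ := h
              exact ⟨j, hjn, by simp, h2, s, hsm, rfl⟩
          · rintro ⟨k, hkn, hks, hk2, s, hsm, rfl⟩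
            rcases List.mem_append.mp hks with h | h
            · exact List.mem_append.mpr (Or.inl ((hacc _).mpr ⟨k, hkn, h, hk2, s, hsm, rfl⟩))
            · have hkv : state.getD k 0 = state.getD j 0 := List.mem_singleton.mp h
              refine List.mem_append.mpr (Or.inr ?_)
              rw [pvBlock, if_pos h2, List.mem_map]
              exact ⟨s, by rw [← hkv]; exact hsm,
                (pvCand_congr state k j hkn hjn hkv s).symm⟩
    · -- pile too small: both sides skip
      have hb : pvBlock state j = [] := by rw [pvBlock, if_neg h2]
      have hstep : pvStepB state (seen, acc) j = (seen, acc) := by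
        rw [pvStepB, if_neg (fun h => h2 h.1)]
      rw [hb, hstep]
      simpa using ih seen acc (fun x hx => hjs x (List.mem_cons_of_mem _ hx)) hseen hacc

-- the slice pieces of A's newState, at a Nat index, are take/drop
theorem pvSlice_take (state : List Int) (j : Nat) :
    PySem.List.slice state none (some (j : Int)) = state.take j := by
  rw [PySem.List.slice_to state (by positivity)]; simp

theorem pvSlice_drop (state : List Int) (j : Nat) :
    PySem.List.slice state (some ((j : Int) + 1)) none = state.drop (j + 1) := by
  rw [show ((j : Int) + 1) = ((j + 1 : Nat) : Int) by push_cast; ring,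
    PySem.List.slice_from state (by positivity)]
  simp

-- A's port is the Set.add fold over the flattened blocks, reversed
theorem pvA_eq (state : List Int) :
    getLegalStates state
      = (((List.range state.length).flatMap (pvBlock state)).foldl PySem.Set.add []).reverse := by
  unfold getLegalStates
  have hbody : ∀ (acc : List (List Int)) (j : Int), j ∈ PySem.List.pyRange 0 (state.length : Int) 1 →
      (if PySem.List.pyGetD state j 0 > 2 then
        (PySem.List.pyRange 1 (PySem.Int.floordiv (PySem.List.pyGetD state j 0) 2 + 1) 1).foldl
          (fun acc splitValue =>
            if splitValue ≠ PySem.List.pyGetD state j 0 - splitValue then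
              let newState := PySem.List.sorted
                (PySem.List.slice state none (some j) ++
                 [PySem.List.pyGetD state j 0 - splitValue, splitValue] ++
                 PySem.List.slice state (some (j + 1)) none) (fun x => x) true
              if newState ∈ acc then acc else newState :: acc
            else acc) acc
      else acc)
      = (pvBlock state j.toNat).foldl pvStep acc := by
    intro acc j hj
    obtain ⟨m, rfl⟩ : ∃ m : Nat, (m : Int) = j :=
      ⟨j.toNat, Int.toNat_of_nonneg (PySem.List.mem_pyRange_one.mp hj).1⟩
    simp only [Int.toNat_natCast, PySem.List.pyGetD_natCast]
    rw [pvBlock]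
    by_cases h : state.getD m 0 > 2
    · rw [if_pos h, if_pos h]
      rw [PySem.List.foldl_ite_eq_foldl_filter
        (p := fun splitValue => splitValue ≠ state.getD m 0 - splitValue)]
      rw [show (List.filter (fun s => decide (s ≠ state.getD m 0 - s))
            (PySem.List.pyRange 1 (PySem.Int.floordiv (state.getD m 0) 2 + 1) 1))
          = pvSplits (state.getD m 0) by
        rw [pvSplits]
        exact List.filter_congr (fun s _ => by
          simp only [decide_eq_decide]; omega)]
      rw [List.foldl_map (f := pvCand state m) (g := pvStep)]
      apply PySem.List.foldl_congr_mem
      intro a s hs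
      have hc : PySem.List.sorted
          (PySem.List.slice state none (some (m : Int)) ++
           [state.getD m 0 - s, s] ++
           PySem.List.slice state (some ((m : Int) + 1)) none) (fun x => x) true
          = pvCand state m s := by
        rw [pvSlice_take, pvSlice_drop, pvCand]
      simp only [hc, pvStep]
    · rw [if_neg h, if_neg h]
      rfl
  rw [PySem.List.foldl_congr_mem _ _
    (fun acc j => (pvBlock state j.toNat).foldl pvStep acc) _ hbody]
  rw [PySem.List.pyRange_zero_natCast, List.foldl_map]
  simp only [Int.toNat_natCast]
  rw [foldl_foldl_flatMap pvStep (pvBlock state) (List.range state.length) []]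
  conv_lhs => rw [show ([] : List (List Int)) = ([] : List (List Int)).reverse from rfl]
  rw [pvStep_rev]

-- B's port is the value-skipping fold over the indices, reversed
theorem pvB_eq (state : List Int) :
    getLegalStates_alt state
      = ((List.range state.length).foldl (pvStepB state) ([], [])).2.reverse := by
  unfold getLegalStates_alt
  rw [PySem.List.enumerate_eq_map_pyRange state 0, List.foldl_map]
  rw [show PySem.List.len state = (state.length : Int) from rfl]
  rw [PySem.List.pyRange_zero_natCast, List.foldl_map]
  simp only []
  congr 1
  show (List.foldl _ (([] : List Int), ([] : List (List Int))) (List.range state.length)).2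
    = (List.foldl (pvStepB state) ([], []) (List.range state.length)).2
  congr 1
  apply PySem.List.foldl_congr_mem
  intro p j hj
  simp only [PySem.List.pyGetD_natCast]
  by_cases hc : 2 < state.getD j 0 ∧ state.getD j 0 ∉ p.1
  · rw [if_pos (by
      refine ⟨hc.1, ?_⟩
      simp only [PySem.Set.contains]
      simpa using hc.2)]
    rw [pvStepB, if_pos hc]
    have hadd : PySem.Set.add p.1 (state.getD j 0) = p.1 ++ [state.getD j 0] := by
      have h2 : state[j]?.getD 0 ∉ p.1 := by
        simpa [List.getD_eq_getElem?_getD] using hc.2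
      simp [PySem.Set.add, PySem.Set.contains, h2]
    rw [hadd]
    congr 1
    rw [PySem.List.foldl_append_ite (p := fun s => 2 * s ≠ state.getD j 0)]
    rw [pvBlock, if_pos hc.1]
    show p.2 ++ _ = p.2 ++ _
    congr 1
    rw [← pvSplits]
    apply List.map_congr_left
    intro s hs
    rw [pvSlice_take, pvSlice_drop, pvCand]
    apply pvSorted_rev_congr
    exact List.perm_append_comm.trans (pvMid_perm state j (state.getD j 0 - s) s).symm
  · rw [if_neg (by
      intro hcon
      apply hc
      refine ⟨hcon.1, ?_⟩
      have := hcon.2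
      simp only [PySem.Set.contains] at this
      simpa using this)]
    rw [pvStepB, if_neg hc]

-- ===== VERDICT (by name: the statement is the Claim_ definition above) =====
theorem getLegalStates_spec : Claim_equal_getLegalStates := by
  intro state _
  show getLegalStates state = getLegalStates_alt state
  rw [pvA_eq, pvB_eq, pvMain state _ [] []]
  · intro j hj; exact List.mem_range.mp hj
  · intro v hv; simp at hv
  · intro c
    constructor
    · intro hc; simp at hc
    · rintro ⟨k, -, hk, -⟩; simp at hk
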